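-- pv_equiv track=rewrite | github.com/JesseSmitsKUL/Thesis_code | createNN.py | transformStream
-- ===== SOURCE A (Python) =====
-- def transformStream(stream,length):
--     x_values = []
--     y_values = []
--     for x in range(length,len(stream)-1):
--         x_val = stream[x-length:x]
--         y_val = stream[x]
--         x_values.append(x_val)
--         y_values.append(y_val)
--     return (x_values,y_values)
-- ===== SOURCE B (Python) =====
-- def transformStream(stream, length):
--     # single pass with a rolling window buffer; no index arithmetic or slicing
--     x_values = []
--     y_values = []
--     window = []
--     pos = 0
--     for v in stream:
--         if len(window) == length and pos < len(stream) - 1: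
--             x_values.append(list(window))
--             y_values.append(v)
--         window.append(v)
--         if len(window) > length:
--             window.pop(0)
--         pos += 1
--     return (x_values, y_values)
-- ===== Notes on version B (the rewrite author's own statement) =====
-- stated objective: alternative
-- what changed: A's indexed loop that slices stream[x-length:x] and reads stream[x] per index is replaced by a single element-wise pass maintaining a rolling window buffer (append + pop(0)) with no indexing or slicing at all.
-- outside the precondition, e.g. on transformStream([1, 2, 3], -2): A returns ([[1], [2], [], []], [2, 3, 1, 2]), B returns ([], []); on transformStream([1], -2): A raises IndexError, B returns ([], [])
import Mathlib
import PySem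

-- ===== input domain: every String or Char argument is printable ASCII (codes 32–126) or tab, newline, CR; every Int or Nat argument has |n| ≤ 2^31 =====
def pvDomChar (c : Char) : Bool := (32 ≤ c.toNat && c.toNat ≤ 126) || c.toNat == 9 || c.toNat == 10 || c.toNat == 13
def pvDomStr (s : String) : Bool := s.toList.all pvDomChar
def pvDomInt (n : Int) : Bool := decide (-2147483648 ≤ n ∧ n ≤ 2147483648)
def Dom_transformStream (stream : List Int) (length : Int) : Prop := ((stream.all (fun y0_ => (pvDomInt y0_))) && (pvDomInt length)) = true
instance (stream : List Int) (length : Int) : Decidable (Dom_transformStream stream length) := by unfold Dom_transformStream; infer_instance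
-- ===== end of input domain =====

-- B replaces A's indexed slicing loop by one element-wise pass maintaining a rolling
-- window buffer (append + pop(0)); objective: alternative algorithm, same cost.

-- ===== PORT A =====
-- literal port of A's loop: fold over range(length, len(stream)-1), appending the
-- window slice and the indexed element; stream[x] is pyGetD (IndexError excluded by Pre_)
def transformStream (stream : List Int) (length : Int) : List (List Int) × List Int :=
  let r := PySem.List.pyRange length ((stream.length : Int) - 1) 1
  let xy := r.foldl
    (fun (acc : List (List Int) × List Int) x =>
      let x_val := PySem.List.slice stream (some (x - length)) (some x)
      let y_val := PySem.List.pyGetD stream x 0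
      (acc.1 ++ [x_val], acc.2 ++ [y_val]))
    ([], [])
  (xy.1, xy.2)

-- ===== PORT B =====
-- B's loop body: state is ((x_values, y_values), window, pos); window.pop(0) is drop 1
def altStep (length n : Int) (st : (List (List Int) × List Int) × List Int × Int)
    (v : Int) : (List (List Int) × List Int) × List Int × Int :=
  let xs := st.1.1
  let ys := st.1.2
  let w := st.2.1
  let pos := st.2.2
  let acc := if (w.length : Int) = length ∧ pos < n - 1 then (xs ++ [w], ys ++ [v]) else (xs, ys)
  let w1 := w ++ [v]
  let w2 := if length < (w1.length : Int) then w1.drop 1 else w1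
  (acc, w2, pos + 1)

def transformStream_alt (stream : List Int) (length : Int) : List (List Int) × List Int :=
  (stream.foldl (altStep length (stream.length : Int)) (([], []), [], 0)).1

-- ===== PRECONDITION & SPEC =====
-- Pre_ restricts to the natural domain of a non-negative window length (or an empty
-- loop range, where A returns ([], []) anyway): on a negative length with a nonempty
-- loop range A either raises IndexError (length < -len(stream)) or returns accidental
-- wraparound slices and targets from Python negative indexing, an artefact of A's
-- implementation that B's rolling window naturally does not produce.
def Pre_transformStream (stream : List Int) (length : Int) : Prop :=
  0 ≤ length ∨ (stream.length : Int) - 1 ≤ length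
instance (stream : List Int) (length : Int) : Decidable (Pre_transformStream stream length) := by unfold Pre_transformStream; infer_instance
def pvWitness_transformStream : List Int × Int := ([1, 2, 3, 4], 2)

def Spec_transformStream (stream : List Int) (length : Int) (out : List (List Int) × List Int) : Prop := out = transformStream_alt stream length
instance (stream : List Int) (length : Int) (out : List (List Int) × List Int) : Decidable (Spec_transformStream stream length out) := by unfold Spec_transformStream; infer_instance

-- ===== CLAIM =====
def Claim_equal_transformStream : Prop := ∀ (stream : List Int) (length : Int), Dom_transformStream stream length → Pre_transformStream stream length → Spec_transformStream stream length (transformStream stream length)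

-- ===== LEMMAS AND PROOFS =====

-- A's double-append fold splits into two maps over the same range
theorem pv_foldl_pair {β γ : Type} (f : Int → β) (g : Int → γ) :
    ∀ (r : List Int) (a : List β) (b : List γ),
      r.foldl (fun (acc : List β × List γ) x => (acc.1 ++ [f x], acc.2 ++ [g x])) (a, b)
        = (a ++ r.map f, b ++ r.map g) := by
  intro r
  induction r with
  | nil => intro a b; simp
  | cons x xs ih => intro a b; simp [ih]

theorem transformStream_unfolded (stream : List Int) (length : Int) :
    transformStream stream length
      = ((PySem.List.pyRange length ((stream.length : Int) - 1) 1).map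
           (fun x => PySem.List.slice stream (some (x - length)) (some x)),
         (PySem.List.pyRange length ((stream.length : Int) - 1) 1).map
           (fun x => PySem.List.pyGetD stream x 0)) := by
  show (((PySem.List.pyRange length ((stream.length : Int) - 1) 1).foldl
      (fun (acc : List (List Int) × List Int) x =>
        (acc.1 ++ [PySem.List.slice stream (some (x - length)) (some x)],
         acc.2 ++ [PySem.List.pyGetD stream x 0]))
      ([], [])).1,
    ((PySem.List.pyRange length ((stream.length : Int) - 1) 1).foldl
      (fun (acc : List (List Int) × List Int) x =>
        (acc.1 ++ [PySem.List.slice stream (some (x - length)) (some x)],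
         acc.2 ++ [PySem.List.pyGetD stream x 0]))
      ([], [])).2) = _
  rw [pv_foldl_pair]
  simp

-- B's rolling-window invariant: after the elements before position k, the window is
-- the last min(k,L) of the first k elements, and the accumulators hold the examples
-- for indices in [max(L,k), n-1).
theorem pv_alt_inv (stream : List Int) (L : Nat) :
    ∀ (s : List Int) (k : Nat), stream.drop k = s →
      ∀ (X : List (List Int)) (Y : List Int),
      (s.foldl (altStep (L : Int) (stream.length : Int))
        ((X, Y), (stream.take k).drop (k - L), (k : Int))).1
      = (X ++ (PySem.List.pyRange (max (L : Int) (k : Int)) ((stream.length : Int) - 1) 1).map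
            (fun x => PySem.List.slice stream (some (x - (L : Int))) (some x)),
         Y ++ (PySem.List.pyRange (max (L : Int) (k : Int)) ((stream.length : Int) - 1) 1).map
            (fun x => PySem.List.pyGetD stream x 0)) := by
  intro s
  induction s with
  | nil =>
    intro k hk X Y
    have hkn : stream.length ≤ k := by
      rw [← List.drop_eq_nil_iff]; exact hk
    rw [PySem.List.pyRange_one_eq_nil (by omega : (stream.length : Int) - 1 ≤ max (L : Int) (k : Int))]
    simp
  | cons v s ih =>
    intro k hk X Y
    have hkn : k < stream.length := by
      by_contra h
      rw [List.drop_eq_nil_iff.2 (by omega)] at hk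
      simp at hk
    have hk' := hk
    rw [List.drop_eq_getElem_cons hkn] at hk'
    have hv : stream[k] = v := (List.cons.injEq _ _ _ _ ▸ hk').1
    have hnext : stream.drop (k + 1) = s := (List.cons.injEq _ _ _ _ ▸ hk').2
    -- window before the step
    have hwlen : ((stream.take k).drop (k - L)).length = k - (k - L) := by
      simp [List.length_drop, List.length_take]; omega
    -- window after append: first k+1 elements, minus the same dropped prefix
    have happ : (stream.take k).drop (k - L) ++ [v]
        = (stream.take (k + 1)).drop (k - L) := by
      rw [List.take_succ]
      have : stream[k]?.toList = [v] := by
        rw [List.getElem?_eq_getElem hkn, hv]; rfl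
      rw [this, List.drop_append_of_le_length (by simp [List.length_take]; omega)]
    simp only [List.foldl_cons]
    by_cases hcase : L ≤ k ∧ k < stream.length - 1
    · -- window full and not the last element: append an example
      obtain ⟨hLk, hklt⟩ := hcase
      have hstep : altStep (L : Int) (stream.length : Int)
          ((X, Y), (stream.take k).drop (k - L), (k : Int)) v
          = ((X ++ [(stream.take k).drop (k - L)], Y ++ [v]),
             (stream.take (k + 1)).drop (k + 1 - L), (((k + 1 : Nat)) : Int)) := by
        simp only [altStep]
        rw [if_pos (by constructor <;> [skip; omega]; rw [hwlen]; push_cast; omega)]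
        rw [if_pos (by simp [List.length_append, hwlen]; omega)]
        rw [happ]
        have : ((stream.take (k + 1)).drop (k - L)).drop 1
            = (stream.take (k + 1)).drop (k + 1 - L) := by
          rw [List.drop_drop]
          congr 1
          omega
        rw [this]
        push_cast
        rfl
      rw [hstep, ih (k + 1) hnext]
      -- identify the appended window and target with the range-map entries
      have hmax1 : max (L : Int) (k : Int) = (k : Int) := by omega
      have hmax2 : max (L : Int) ((k : Int) + 1) = (k : Int) + 1 := by omega
      have hcons : PySem.List.pyRange (max (L : Int) (k : Int)) ((stream.length : Int) - 1) 1
          = (k : Int) :: PySem.List.pyRange ((k : Int) + 1) ((stream.length : Int) - 1) 1 := by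
        rw [hmax1, PySem.List.pyRange_one_cons (by omega)]
      have hwin : PySem.List.slice stream (some ((k : Int) - (L : Int))) (some (k : Int))
          = (stream.take k).drop (k - L) := by
        rw [PySem.List.slice_toNat stream (by omega) (by omega), List.drop_take]
        have e1 : ((k : Int) - (L : Int)).toNat = k - L := by omega
        rw [e1]
        congr 1
      have htgt : PySem.List.pyGetD stream (k : Int) 0 = v := by
        rw [PySem.List.pyGetD_eq_getElem stream 0 (by omega) (by push_cast; omega)]
        simpa using hv
      rw [hcons]
      push_cast
      rw [List.map_cons, List.map_cons, hwin, htgt, hmax2]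
      simp
    · -- no example appended at this position
      have hstep : altStep (L : Int) (stream.length : Int)
          ((X, Y), (stream.take k).drop (k - L), (k : Int)) v
          = ((X, Y), (stream.take (k + 1)).drop (k + 1 - L), (((k + 1 : Nat)) : Int)) := by
        simp only [altStep]
        rw [if_neg (by
          intro hc
          obtain ⟨h1, h2⟩ := hc
          rw [hwlen] at h1
          exact hcase ⟨by omega, by omega⟩)]
        rw [happ]
        have hlen1 : ((stream.take (k + 1)).drop (k - L)).length = (k + 1) - (k - L) := by
          simp [List.length_drop, List.length_take]
          omega
        have hw2 : (if ((L : Nat) : Int) < ((((stream.take (k + 1)).drop (k - L)).length : Nat) : Int)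
              then ((stream.take (k + 1)).drop (k - L)).drop 1
              else (stream.take (k + 1)).drop (k - L))
            = (stream.take (k + 1)).drop (k + 1 - L) := by
          by_cases hfull : L ≤ k
          · rw [if_pos (by rw [hlen1]; omega)]
            rw [List.drop_drop]
            congr 1
            omega
          · rw [if_neg (by rw [hlen1]; omega)]
            congr 1
            omega
        rw [hw2]
        push_cast
        rfl
      rw [hstep, ih (k + 1) hnext]
      have hmaxeq : max (L : Int) ((k : Int) + 1) = max (L : Int) (k : Int)
          ∨ ((stream.length : Int) - 1 ≤ max (L : Int) (k : Int)
             ∧ (stream.length : Int) - 1 ≤ max (L : Int) ((k : Int) + 1)) := by omega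
      rcases hmaxeq with h | ⟨h1, h2⟩
      · push_cast
        rw [h]
      · rw [PySem.List.pyRange_one_eq_nil h1]
        push_cast
        rw [PySem.List.pyRange_one_eq_nil (by push_cast at h2 ⊢; omega)]

-- with a negative length B's accumulators never change
theorem pv_alt_neg (stream : List Int) (length : Int) (hneg : length < 0) :
    ∀ (s : List Int) (X : List (List Int)) (Y : List Int) (w : List Int) (p : Int),
      (s.foldl (altStep length (stream.length : Int)) ((X, Y), w, p)).1 = (X, Y) := by
  intro s
  induction s with
  | nil => intro X Y w p; rfl
  | cons v s ih =>
    intro X Y w p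
    simp only [List.foldl_cons, altStep]
    rw [if_neg (by intro hc; have := hc.1; omega)]
    exact ih X Y _ _

-- ===== VERDICT =====
theorem transformStream_spec : Claim_equal_transformStream := by
  intro stream length _ hpre
  unfold Spec_transformStream
  unfold Pre_transformStream at hpre
  by_cases hL0 : 0 ≤ length
  · obtain ⟨L, rfl⟩ : ∃ L : Nat, length = (L : Int) := ⟨length.toNat, by omega⟩
    rw [transformStream_unfolded]
    unfold transformStream_alt
    have := pv_alt_inv stream L stream 0 (by simp) [] []
    simp only [List.take_zero, List.drop_nil, Nat.cast_zero, List.nil_append] at this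
    have hmax0 : max ((L : Nat) : Int) (0 : Int) = ((L : Nat) : Int) := by omega
    rw [hmax0] at this
    rw [this]
  · -- length < 0 and len-1 ≤ length : the loop range is empty, both sides are ([], [])
    have hle : (stream.length : Int) - 1 ≤ length := by tauto
    rw [transformStream_unfolded, PySem.List.pyRange_one_eq_nil hle]
    unfold transformStream_alt
    rw [pv_alt_neg stream length (by omega) stream [] [] [] 0]
    rfl
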